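-- pv_equiv track=rewrite | github.com/itsatony/mediabase | config/etl_sequence.py | get_optimal_sequence
-- ===== SOURCE A (Python) =====
-- from typing import Dict, List, Set, Optional, Any
--
-- MODULE_DEPENDENCIES = {
--     'transcript': [],  # No prerequisites
--     'id_enrichment': ['transcript'],  # Needs transcript data
--     'go_terms': ['transcript'],  # Needs transcript data
--     'products': ['transcript', 'id_enrichment'],  # Needs transcript and ID data
--     'pathways': ['transcript', 'id_enrichment'],  # Needs transcript and ID data
--     'pubtator': ['transcript', 'id_enrichment'],  # Needs transcript and NCBI Gene ID mappings
--     'opentargets': ['transcript', 'id_enrichment'],  # Needs transcript and Ensembl Gene ID mappings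
--     'drugs': ['transcript', 'id_enrichment', 'go_terms', 'pathways', 'products'],  # Needs many dependencies
--     'publications': ['transcript', 'go_terms', 'products', 'pathways', 'drugs'],  # Needs all sources of PMIDs
--     'evidence_scoring': ['transcript', 'drugs', 'pathways', 'go_terms', 'publications'],  # Needs all evidence sources
--     'pharmgkb_annotations': ['transcript', 'id_enrichment'],  # Needs transcript and ID data
--     'chembl_drugs': ['transcript', 'id_enrichment'],  # Needs transcript and ID data
--     'drug_repurposing_hub': ['transcript']  # Needs transcript data
-- }
--
-- DEFAULT_SEQUENCE = [
--     'transcript',             # Always first - loads base data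
--     'id_enrichment',          # Second - adds cross-database identifiers
--     'go_terms',               # Third - adds GO terms and molecular functions
--     'products',               # Fourth - classifies gene products
--     'pathways',               # Fifth - adds pathway data
--     'pubtator',               # Sixth - adds gene-publication associations from PubTator Central
--     'opentargets',            # Seventh - adds disease-gene associations and drug-target evidence
--     'drugs',                  # Eighth - adds drug interaction data
--     'pharmgkb_annotations',   # Ninth - adds pharmacogenomic annotations
--     'chembl_drugs',           # Tenth - adds ChEMBL drug data
--     'drug_repurposing_hub',   # Eleventh - adds drug repurposing data
--     'publications',           # Twelfth - enriches publication references from all modules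
--     'evidence_scoring'        # Last - generates comprehensive evidence scores
-- ]
--
-- def get_optimal_sequence(requested_modules: Optional[List[str]] = None) -> List[str]:
--     """Get optimal execution sequence for requested modules.
--
--     Args:
--         requested_modules: List of requested modules or None for all modules
--
--     Returns:
--         List of modules in correct execution order
--     """
--     if not requested_modules:
--         return DEFAULT_SEQUENCE
--
--     # Filter to only known modules
--     valid_modules = [m for m in requested_modules if m in MODULE_DEPENDENCIES]
--
--     # Get all dependencies recursively
--     all_modules = set(valid_modules)
--     for module in valid_modules:
--         _add_dependencies_recursive(module, all_modules)
--
--     # Return modules in correct order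
--     return [m for m in DEFAULT_SEQUENCE if m in all_modules]
--
-- def _add_dependencies_recursive(module: str, all_modules: Set[str]) -> None:
--     """Add all recursive dependencies of a module to the set.
--
--     Args:
--         module: Module to add dependencies for
--         all_modules: Set to add dependencies to
--     """
--     if module not in MODULE_DEPENDENCIES:
--         return
--
--     for dependency in MODULE_DEPENDENCIES[module]:
--         all_modules.add(dependency)
--         _add_dependencies_recursive(dependency, all_modules)
-- ===== SOURCE B (Python) =====
-- from typing import Dict, List, Set, Optional, Any
--
-- MODULE_DEPENDENCIES = {
--     'transcript': [],
--     'id_enrichment': ['transcript'],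
--     'go_terms': ['transcript'],
--     'products': ['transcript', 'id_enrichment'],
--     'pathways': ['transcript', 'id_enrichment'],
--     'pubtator': ['transcript', 'id_enrichment'],
--     'opentargets': ['transcript', 'id_enrichment'],
--     'drugs': ['transcript', 'id_enrichment', 'go_terms', 'pathways', 'products'],
--     'publications': ['transcript', 'go_terms', 'products', 'pathways', 'drugs'],
--     'evidence_scoring': ['transcript', 'drugs', 'pathways', 'go_terms', 'publications'],
--     'pharmgkb_annotations': ['transcript', 'id_enrichment'],
--     'chembl_drugs': ['transcript', 'id_enrichment'],
--     'drug_repurposing_hub': ['transcript']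
-- }
--
-- DEFAULT_SEQUENCE = [
--     'transcript', 'id_enrichment', 'go_terms', 'products', 'pathways',
--     'pubtator', 'opentargets', 'drugs', 'pharmgkb_annotations',
--     'chembl_drugs', 'drug_repurposing_hub', 'publications', 'evidence_scoring'
-- ]
--
-- # Precomputed transitive-dependency closure (each module together with all of
-- # its recursive prerequisites); no traversal is needed at query time.
-- _CLOSURE = {
--     'transcript': {'transcript'},
--     'id_enrichment': {'id_enrichment', 'transcript'},
--     'go_terms': {'go_terms', 'transcript'},
--     'products': {'products', 'transcript', 'id_enrichment'},
--     'pathways': {'pathways', 'transcript', 'id_enrichment'},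
--     'pubtator': {'pubtator', 'transcript', 'id_enrichment'},
--     'opentargets': {'opentargets', 'transcript', 'id_enrichment'},
--     'drugs': {'drugs', 'transcript', 'id_enrichment', 'go_terms', 'pathways', 'products'},
--     'publications': {'publications', 'transcript', 'id_enrichment', 'go_terms', 'products', 'pathways', 'drugs'},
--     'evidence_scoring': {'evidence_scoring', 'transcript', 'id_enrichment', 'go_terms', 'products', 'pathways', 'drugs', 'publications'},
--     'pharmgkb_annotations': {'pharmgkb_annotations', 'transcript', 'id_enrichment'},
--     'chembl_drugs': {'chembl_drugs', 'transcript', 'id_enrichment'},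
--     'drug_repurposing_hub': {'drug_repurposing_hub', 'transcript'}
-- }
--
-- def get_optimal_sequence(requested_modules: Optional[List[str]] = None) -> List[str]:
--     """Get optimal execution sequence for requested modules."""
--     if not requested_modules:
--         return DEFAULT_SEQUENCE
--     needed = set()
--     for m in set(requested_modules):
--         needed |= _CLOSURE.get(m, set())
--     return [m for m in DEFAULT_SEQUENCE if m in needed]
-- ===== Notes on version B (the rewrite author's own statement) =====
-- stated objective: alternative
-- what changed: Replaces the per-occurrence recursive dependency expansion over MODULE_DEPENDENCIES with a precomputed per-module transitive-closure table, unioned once over the distinct requested modules.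
import Mathlib
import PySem

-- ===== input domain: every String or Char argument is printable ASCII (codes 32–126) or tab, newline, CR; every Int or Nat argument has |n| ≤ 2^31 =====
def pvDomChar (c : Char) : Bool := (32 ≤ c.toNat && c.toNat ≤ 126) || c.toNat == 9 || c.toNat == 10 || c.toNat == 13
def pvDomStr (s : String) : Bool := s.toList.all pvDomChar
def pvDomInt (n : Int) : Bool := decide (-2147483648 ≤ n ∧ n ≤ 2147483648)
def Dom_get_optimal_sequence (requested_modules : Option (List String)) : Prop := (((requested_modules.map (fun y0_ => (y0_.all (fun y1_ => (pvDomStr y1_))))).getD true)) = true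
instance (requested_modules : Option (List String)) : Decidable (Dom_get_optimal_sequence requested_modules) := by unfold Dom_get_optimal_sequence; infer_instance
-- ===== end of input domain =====

-- B replaces the recursive dependency walk with a precomputed per-module closure table unioned over the distinct requested modules (objective: alternative).
-- In the empty/None branch Python A returns the DEFAULT_SEQUENCE list object itself; equivalence here is about the return VALUE.

-- ===== PORT A =====
def pvDeps : PySem.Dict String (List String) := PySem.Dict.mk [  -- keys distinct, so the literal dict is exactly dict(...)
  ("transcript", []),
  ("id_enrichment", ["transcript"]),
  ("go_terms", ["transcript"]),
  ("products", ["transcript", "id_enrichment"]),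
  ("pathways", ["transcript", "id_enrichment"]),
  ("pubtator", ["transcript", "id_enrichment"]),
  ("opentargets", ["transcript", "id_enrichment"]),
  ("drugs", ["transcript", "id_enrichment", "go_terms", "pathways", "products"]),
  ("publications", ["transcript", "go_terms", "products", "pathways", "drugs"]),
  ("evidence_scoring", ["transcript", "drugs", "pathways", "go_terms", "publications"]),
  ("pharmgkb_annotations", ["transcript", "id_enrichment"]),
  ("chembl_drugs", ["transcript", "id_enrichment"]),
  ("drug_repurposing_hub", ["transcript"])]

def pvDefaultSeq : List String := [
  "transcript", "id_enrichment", "go_terms", "products", "pathways",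
  "pubtator", "opentargets", "drugs", "pharmgkb_annotations",
  "chembl_drugs", "drug_repurposing_hub", "publications", "evidence_scoring"]

-- _add_dependencies_recursive; fuel (13 ≥ any dependency-chain length) only makes the recursion total.
def pvAddDepsRec (fuel : Nat) (module : String) (all_modules : PySem.Set String) : PySem.Set String :=
  match fuel with
  | 0 => all_modules
  | fuel + 1 =>
    match pvDeps.get? module with
    | none => all_modules
    | some deps => deps.foldl (fun s d => pvAddDepsRec fuel d (PySem.Set.add s d)) all_modules

def get_optimal_sequence (requested_modules : Option (List String)) : List String :=
  match requested_modules with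
  | none => pvDefaultSeq
  | some l =>
    if l.isEmpty then pvDefaultSeq
    else
      let valid_modules := l.filter (fun m => pvDeps.contains m)
      let all_modules := valid_modules.foldl (fun s m => pvAddDepsRec 13 m s) (PySem.Set.ofList valid_modules)
      pvDefaultSeq.filter (fun m => PySem.Set.contains all_modules m)

-- ===== PORT B =====
-- the precomputed closure table (_CLOSURE); .get(m, set()) = [] for unknown modules
def pvClosure (m : String) : List String :=
  if m = "transcript" then ["transcript"]
  else if m = "id_enrichment" then ["id_enrichment", "transcript"]
  else if m = "go_terms" then ["go_terms", "transcript"]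
  else if m = "products" then ["products", "transcript", "id_enrichment"]
  else if m = "pathways" then ["pathways", "transcript", "id_enrichment"]
  else if m = "pubtator" then ["pubtator", "transcript", "id_enrichment"]
  else if m = "opentargets" then ["opentargets", "transcript", "id_enrichment"]
  else if m = "drugs" then ["drugs", "transcript", "id_enrichment", "go_terms", "pathways", "products"]
  else if m = "publications" then ["publications", "transcript", "id_enrichment", "go_terms", "products", "pathways", "drugs"]
  else if m = "evidence_scoring" then ["evidence_scoring", "transcript", "id_enrichment", "go_terms", "products", "pathways", "drugs", "publications"]
  else if m = "pharmgkb_annotations" then ["pharmgkb_annotations", "transcript", "id_enrichment"]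
  else if m = "chembl_drugs" then ["chembl_drugs", "transcript", "id_enrichment"]
  else if m = "drug_repurposing_hub" then ["drug_repurposing_hub", "transcript"]
  else []

def get_optimal_sequence_alt (requested_modules : Option (List String)) : List String :=
  match requested_modules with
  | none => pvDefaultSeq
  | some l =>
    if l.isEmpty then pvDefaultSeq
    else
      let needed := (PySem.Set.ofList l).foldl (fun s m => PySem.Set.update s (pvClosure m)) PySem.Set.empty
      pvDefaultSeq.filter (fun m => PySem.Set.contains needed m)

-- ===== PRECONDITION & SPEC =====
def Spec_get_optimal_sequence (requested_modules : Option (List String)) (out : List String) : Prop := out = get_optimal_sequence_alt requested_modules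
instance (requested_modules : Option (List String)) (out : List String) : Decidable (Spec_get_optimal_sequence requested_modules out) := by unfold Spec_get_optimal_sequence; infer_instance

-- ===== CLAIM (what is proved, stated in full; the proofs are below) =====
def Claim_equal_get_optimal_sequence : Prop := ∀ (requested_modules : Option (List String)), Dom_get_optimal_sequence requested_modules → Spec_get_optimal_sequence requested_modules (get_optimal_sequence requested_modules)

-- ===== LEMMAS AND PROOFS =====

def pvKeys : List String := ["transcript", "id_enrichment", "go_terms", "products", "pathways", "pubtator", "opentargets", "drugs", "publications", "evidence_scoring", "pharmgkb_annotations", "chembl_drugs", "drug_repurposing_hub"]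

-- the list of modules the recursive walk from `module` adds (in add order), mirroring pvAddDepsRec without the accumulator
def pvMarkList (fuel : Nat) (module : String) : List String :=
  match fuel with
  | 0 => []
  | f + 1 =>
    match pvDeps.get? module with
    | none => []
    | some deps => deps.flatMap (fun d => d :: pvMarkList f d)

theorem mem_addDepsRec (fuel : Nat) (x : String) (s : PySem.Set String) (m : String) :
    m ∈ pvAddDepsRec fuel x s ↔ m ∈ s ∨ m ∈ pvMarkList fuel x := by
  induction fuel generalizing x s with
  | zero => simp [pvAddDepsRec, pvMarkList]
  | succ f ih =>
    rw [pvAddDepsRec, pvMarkList]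
    cases h : pvDeps.get? x with
    | none => simp
    | some deps =>
      simp only
      clear h
      induction deps generalizing s with
      | nil => simp
      | cons d t iht =>
        simp only [List.foldl_cons, List.flatMap_cons]
        rw [iht, ih, PySem.Set.mem_add]
        simp only [List.mem_append, List.mem_cons]
        tauto

set_option maxRecDepth 100000 in
theorem mark_tail (x : String) (hx : x ∈ pvKeys) (m : String) :
    m ∈ pvMarkList 13 x ↔ m ∈ (pvClosure x).tail := by
  have h : ∀ x ∈ pvKeys, (PySem.Set.ofList (pvMarkList 13 x)).Perm (PySem.Set.ofList (pvClosure x).tail) := by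
    decide
  calc m ∈ pvMarkList 13 x ↔ m ∈ PySem.Set.ofList (pvMarkList 13 x) := (PySem.Set.mem_ofList _ m).symm
    _ ↔ m ∈ PySem.Set.ofList (pvClosure x).tail := (h x hx).mem_iff
    _ ↔ m ∈ (pvClosure x).tail := PySem.Set.mem_ofList _ m

theorem mem_foldA (l : List String) (hl : ∀ x ∈ l, x ∈ pvKeys) (s : PySem.Set String) (m : String) :
    (m ∈ l.foldl (fun s m => pvAddDepsRec 13 m s) s) ↔ (m ∈ s ∨ ∃ x ∈ l, m ∈ (pvClosure x).tail) := by
  induction l generalizing s with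
  | nil => simp
  | cons a t ih =>
    simp only [List.foldl_cons]
    rw [ih (fun x hx => hl x (List.mem_cons_of_mem a hx))]
    rw [mem_addDepsRec 13 a s m, mark_tail a (hl a (List.mem_cons_self ..)) m]
    simp only [List.mem_cons]
    constructor
    · rintro ((h | h) | ⟨x, hx, hm⟩)
      · exact Or.inl h
      · exact Or.inr ⟨a, Or.inl rfl, h⟩
      · exact Or.inr ⟨x, Or.inr hx, hm⟩
    · rintro (h | ⟨x, (rfl | hx), hm⟩)
      · exact Or.inl (Or.inl h)
      · exact Or.inl (Or.inr hm)
      · exact Or.inr ⟨x, hx, hm⟩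

theorem mem_foldB (l : List String) (s : PySem.Set String) (m : String) :
    (m ∈ l.foldl (fun s m => PySem.Set.update s (pvClosure m)) s) ↔ (m ∈ s ∨ ∃ x ∈ l, m ∈ pvClosure x) := by
  induction l generalizing s with
  | nil => simp
  | cons a t ih =>
    simp only [List.foldl_cons]
    rw [ih, PySem.Set.mem_update]
    simp only [List.mem_cons]
    constructor
    · rintro ((h | h) | ⟨x, hx, hm⟩)
      · exact Or.inl h
      · exact Or.inr ⟨a, Or.inl rfl, h⟩
      · exact Or.inr ⟨x, Or.inr hx, hm⟩
    · rintro (h | ⟨x, (rfl | hx), hm⟩)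
      · exact Or.inl (Or.inl h)
      · exact Or.inl (Or.inr hm)
      · exact Or.inr ⟨x, hx, hm⟩

theorem contains_key_iff (m : String) : pvDeps.contains m = true ↔ m ∈ pvKeys := by
  rw [PySem.Dict.contains_iff_mem_keys]
  simp [pvDeps, pvKeys, PySem.Dict.keys]

theorem closure_head (x : String) (hx : x ∈ pvKeys) : pvClosure x = x :: (pvClosure x).tail := by
  fin_cases hx <;> rfl

theorem closure_nonkey (x : String) (hx : x ∉ pvKeys) : pvClosure x = [] := by
  simp only [pvKeys, List.mem_cons, List.not_mem_nil, or_false, not_or] at hx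
  obtain ⟨h1, h2, h3, h4, h5, h6, h7, h8, h9, h10, h11, h12, h13⟩ := hx
  simp [pvClosure, h1, h2, h3, h4, h5, h6, h7, h8, h9, h10, h11, h12, h13]

-- ===== VERDICT (by name: the statement is the Claim_ definition above) =====
theorem get_optimal_sequence_spec : Claim_equal_get_optimal_sequence := by
  unfold Claim_equal_get_optimal_sequence
  intro rm _
  unfold Spec_get_optimal_sequence
  rcases rm with _ | l
  · rfl
  simp only [get_optimal_sequence, get_optimal_sequence_alt]
  by_cases hl : l.isEmpty
  · rw [if_pos hl, if_pos hl]
  · rw [if_neg hl, if_neg hl]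
    apply List.filter_congr
    intro m _
    rw [Bool.eq_iff_iff]
    simp only [PySem.Set.contains_iff]
    rw [mem_foldA _ (fun x hx => (contains_key_iff x).1 (by simpa using (List.mem_filter.1 hx).2)),
        mem_foldB, PySem.Set.mem_ofList]
    simp only [PySem.Set.empty, List.not_mem_nil, false_or, PySem.Set.mem_ofList]
    constructor
    · rintro (hmf | ⟨x, hx, hm⟩)
      · obtain ⟨hm, hk⟩ := List.mem_filter.1 hmf
        exact ⟨m, hm, by rw [closure_head m ((contains_key_iff m).1 (by simpa using hk))]; exact List.mem_cons_self ..⟩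
      · exact ⟨x, (List.mem_filter.1 hx).1, List.mem_of_mem_tail hm⟩
    · rintro ⟨x, hx, hm⟩
      by_cases hk : x ∈ pvKeys
      · rw [closure_head x hk] at hm
        rcases List.mem_cons.1 hm with rfl | hm
        · exact Or.inl (List.mem_filter.2 ⟨hx, by simpa using (contains_key_iff m).2 hk⟩)
        · exact Or.inr ⟨x, List.mem_filter.2 ⟨hx, by simpa using (contains_key_iff x).2 hk⟩, hm⟩
      · rw [closure_nonkey x hk] at hm; cases hm
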